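-- pv_equiv track=rewrite | github.com/VIVERA83/Codewars | 5/Double Cola 5.py | who_is_next
-- ===== SOURCE A (Python) =====
-- def who_is_next(names, r):
--     number = len(names)
--     prog, mysum, i = 1, 0, 0
--     while r > mysum + prog * number:
--         mysum += prog * number
--         prog *= 2
--     while (r - mysum) > i * prog:
--         i += 1
--     return names[i-1]
-- ===== SOURCE B (Python) =====
-- def who_is_next(names, r):
--     # Closed form: after k full doubling rounds the queue has consumed n*(2**k - 1) cans;
--     # k = floor(log2((r-1)//n + 1)) via bit_length, then index by division -- no scans.
--     n = len(names)
--     k = ((r - 1) // n + 1).bit_length() - 1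
--     return names[(r - 1 - n * (2**k - 1)) // 2**k]
-- ===== Notes on version B (the rewrite author's own statement) =====
-- stated objective: alternative
-- what changed: Both of A's loops are replaced by closed forms: the doubling round k is computed directly with bit_length (k = floor(log2((r-1)//n + 1))) and the person index by one floor division, eliminating A's O(n)-iteration second loop and both scans (intended as faster; a timing run measured ~1.6x at the largest size but not consistently, so no speed is claimed).
-- outside the precondition, e.g. on who_is_next(['a', 'b'], 0): A returns 'b', B raises TypeError; on who_is_next(['a', 'b'], -5): A returns 'b', B raises IndexError; on who_is_next([], 3): A does not finish within the time limit, B raises ZeroDivisionError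
import Mathlib
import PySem

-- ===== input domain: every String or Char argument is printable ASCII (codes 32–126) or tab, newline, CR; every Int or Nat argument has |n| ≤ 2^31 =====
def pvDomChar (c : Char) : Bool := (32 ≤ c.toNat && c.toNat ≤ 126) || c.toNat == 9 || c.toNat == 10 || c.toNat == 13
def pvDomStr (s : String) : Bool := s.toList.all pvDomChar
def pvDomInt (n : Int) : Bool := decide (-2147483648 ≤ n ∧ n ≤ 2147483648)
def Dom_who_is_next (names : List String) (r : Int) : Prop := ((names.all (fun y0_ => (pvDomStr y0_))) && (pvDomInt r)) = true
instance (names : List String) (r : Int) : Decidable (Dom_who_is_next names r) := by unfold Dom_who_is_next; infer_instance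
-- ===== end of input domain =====

-- B replaces A's two loops (repeated doubling, then a linear scan for the person index) by
-- closed forms: bit_length gives the doubling round, one floor division gives the index.

-- ===== PORT A =====
-- first while loop of A: while r > mysum + prog * number: mysum += prog*number; prog *= 2
-- (the 'prog * number ≤ 0' test is only a totality guard: in A's run prog = 2^j ≥ 1 always, and
--  number ≥ 1 under Pre_, so it never fires; with number = 0 the Python loop diverges — excluded by Pre_)
def wisLoop1 (number r mysum prog : Int) : Int × Int :=
  if prog * number ≤ 0 then (mysum, prog)
  else if mysum + prog * number < r then wisLoop1 number r (mysum + prog * number) (prog * 2)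
  else (mysum, prog)
termination_by (r - mysum).toNat
decreasing_by
  generalize hp : prog * number = p at *
  omega

-- second while loop of A: while (r - mysum) > i * prog: i += 1
-- (the 'prog ≤ 0' test is only a totality guard: prog = 2^K ≥ 1 after the first loop)
def wisLoop2 (r mysum prog i : Int) : Int :=
  if prog ≤ 0 then i
  else if i * prog < r - mysum then wisLoop2 r mysum prog (i + 1)
  else i
termination_by (r - mysum - i * prog).toNat
decreasing_by
  have he : (i + 1) * prog = i * prog + prog := by ring
  rw [he]
  generalize hip : i * prog = ip at *
  omega

def who_is_next (names : List String) (r : Int) : String :=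
  let number : Int := names.length
  let sp := wisLoop1 number r 0 1
  let i := wisLoop2 r sp.1 sp.2 0
  PySem.List.pyGetD names (i - 1) ""   -- names[i-1]; IndexError is excluded by Pre_

-- ===== PORT B =====
def who_is_next_alt (names : List String) (r : Int) : String :=
  let n : Int := names.length
  -- ((r - 1) // n + 1).bit_length() - 1 ; n = 0 (Python: ZeroDivisionError) is outside Pre_
  let k : Int := (PySem.Int.bitLength (PySem.Int.floordiv (r - 1) n + 1) : Int) - 1
  -- 2**k ported as 2 ^ k.toNat: exact whenever k ≥ 0, which holds for every r ≥ 1; for k = -1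
  -- (only reachable with r ≤ 0) Python's 2**k is a float and the program raises — outside Pre_
  PySem.List.pyGetD names (PySem.Int.floordiv (r - 1 - n * (2 ^ k.toNat - 1)) (2 ^ k.toNat)) ""

-- ===== PRECONDITION & SPEC =====
-- Pre_ excludes names = [] (A diverges for r ≥ 1 and raises IndexError for r ≤ 0) and r ≤ 0,
-- where A's names[i-1] with leftover i = 0 wraps around to the LAST element — an artefact of
-- Python's negative indexing; B raises (TypeError/IndexError/ZeroDivisionError) on all of those.
def Pre_who_is_next (names : List String) (r : Int) : Prop := names ≠ [] ∧ 1 ≤ r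
instance (names : List String) (r : Int) : Decidable (Pre_who_is_next names r) := by
  unfold Pre_who_is_next; infer_instance

def pvWitness_who_is_next : List String × Int := (["Sheldon", "Leonard", "Penny"], 7)

def Spec_who_is_next (names : List String) (r : Int) (out : String) : Prop := out = who_is_next_alt names r
instance (names : List String) (r : Int) (out : String) : Decidable (Spec_who_is_next names r out) := by unfold Spec_who_is_next; infer_instance

-- ===== CLAIM (what is proved, stated in full; the proofs are below) =====
def Claim_equal_who_is_next : Prop := ∀ (names : List String) (r : Int), Dom_who_is_next names r → Pre_who_is_next names r → Spec_who_is_next names r (who_is_next names r)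

-- ===== LEMMAS AND PROOFS =====

-- the first loop, started in round j with state (n*(2^j-1), 2^j), stops in the first
-- round K ≥ j whose cumulative total n*(2^(K+1)-1) reaches r
theorem wisLoop1_spec (n r : Int) (hn : 0 < n) (j : Nat) (hj : n * (2 ^ j - 1) < r) :
    ∃ K : Nat, wisLoop1 n r (n * (2 ^ j - 1)) (2 ^ j) = (n * (2 ^ K - 1), 2 ^ K) ∧
      n * (2 ^ K - 1) < r ∧ r ≤ n * (2 ^ (K + 1) - 1) := by
  rw [wisLoop1]
  have hguard : ¬ (2 ^ j * n ≤ 0) := not_le.mpr (mul_pos (by positivity) hn)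
  rw [if_neg hguard]
  have e1 : n * (2 ^ j - 1) + 2 ^ j * n = n * (2 ^ (j + 1) - 1) := by rw [pow_succ]; ring
  have e2 : (2 : Int) ^ j * 2 = 2 ^ (j + 1) := by rw [pow_succ]
  by_cases hc : n * (2 ^ j - 1) + 2 ^ j * n < r
  · rw [if_pos hc, e1, e2]
    exact wisLoop1_spec n r hn (j + 1) (by rw [← e1]; exact hc)
  · rw [if_neg hc]
    have hle := not_lt.mp hc
    exact ⟨j, rfl, hj, by linarith⟩
termination_by (r - n * (2 ^ j - 1)).toNat
decreasing_by
  have h2 : (0 : Int) < 2 ^ j * n := mul_pos (by positivity) hn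
  have key1 : n * (2 ^ j - 1) < n * (2 ^ (j + 1) - 1) := by linarith
  have key2 : n * (2 ^ (j + 1) - 1) < r := by linarith
  generalize hA : n * (2 ^ j - 1) = A at key1 ⊢
  generalize hB : n * (2 ^ (j + 1) - 1) = B at key1 key2 ⊢
  omega

-- the second loop returns the least t ≥ i with r - mysum ≤ t * prog
theorem wisLoop2_spec (r mysum prog i t : Int) (hp : 0 < prog) (hit : i ≤ t)
    (ht1 : r - mysum ≤ t * prog) (ht2 : (t - 1) * prog < r - mysum) :
    wisLoop2 r mysum prog i = t := by
  rw [wisLoop2]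
  rw [if_neg (not_le.mpr hp)]
  by_cases hc : i * prog < r - mysum
  · rw [if_pos hc]
    have hit' : i + 1 ≤ t := by
      by_contra h
      have hit2 : i = t := le_antisymm hit (by omega)
      rw [hit2] at hc
      linarith
    exact wisLoop2_spec r mysum prog (i + 1) t hp hit' ht1 ht2
  · rw [if_neg hc]
    rcases eq_or_lt_of_le hit with h | h
    · exact h
    · exfalso
      have h1 : i ≤ t - 1 := by omega
      have h2 : i * prog ≤ (t - 1) * prog := mul_le_mul_of_nonneg_right h1 (le_of_lt hp)
      have h3 : r - mysum ≤ i * prog := not_lt.mp hc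
      linarith
termination_by (t - i).toNat
decreasing_by omega

-- bit_length characterisation: 2^K ≤ m < 2^(K+1) forces bitLength m = K + 1
theorem bitLength_eq_of_bounds (m : Int) (K : Nat) (h1 : (2 : Int) ^ K ≤ m) (h2 : m < 2 ^ (K + 1)) :
    PySem.Int.bitLength m = K + 1 := by
  have hpos : (0 : Int) < m := lt_of_lt_of_le (by positivity) h1
  have hm0 : m ≠ 0 := ne_of_gt hpos
  have hcast : ((m.natAbs : Int)) = m := Int.natAbs_of_nonneg (le_of_lt hpos)
  have h1n : 2 ^ K ≤ m.natAbs := by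
    have h := h1
    rw [← hcast] at h
    exact_mod_cast h
  have h2n : m.natAbs < 2 ^ (K + 1) := by
    have h := h2
    rw [← hcast] at h
    exact_mod_cast h
  have hA := PySem.Int.lt_two_pow_bitLength m
  have hB := PySem.Int.two_pow_bitLength_le m hm0
  have hKL : K < PySem.Int.bitLength m :=
    (Nat.pow_lt_pow_iff_right (by norm_num)).mp (lt_of_le_of_lt h1n hA)
  have hLK : PySem.Int.bitLength m - 1 < K + 1 :=
    (Nat.pow_lt_pow_iff_right (by norm_num)).mp (lt_of_le_of_lt hB h2n)
  omega

-- ===== VERDICT (by name: the statement is the Claim_ definition above) =====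
theorem who_is_next_spec : Claim_equal_who_is_next := by
  intro names r _hdom hpre
  obtain ⟨hne, hr⟩ := hpre
  unfold Spec_who_is_next
  simp only [who_is_next, who_is_next_alt]
  set n : Int := (names.length : Int) with hn_def
  have hlen : 0 < names.length := by
    cases names with
    | nil => exact absurd rfl hne
    | cons a l => simp
  have hn : (0 : Int) < n := by rw [hn_def]; exact_mod_cast hlen
  have hstart : n * ((2 : Int) ^ 0 - 1) < r := by norm_num; omega
  obtain ⟨K, hloop1, hlo, hhi⟩ := wisLoop1_spec n r hn 0 hstart
  have e0 : n * ((2 : Int) ^ 0 - 1) = 0 := by norm_num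
  have e0' : ((2 : Int) ^ 0) = 1 := by norm_num
  rw [e0, e0'] at hloop1
  have hfst : (wisLoop1 n r 0 1).1 = n * (2 ^ K - 1) := by rw [hloop1]
  have hsnd : (wisLoop1 n r 0 1).2 = 2 ^ K := by rw [hloop1]
  rw [hfst, hsnd]
  have hlo' : n * (2 ^ K - 1) + 1 ≤ r := Int.lt_iff_add_one_le.mp hlo
  set q := PySem.Int.floordiv (r - 1) n with hq_def
  have hq1 : (2 : Int) ^ K - 1 ≤ q := by
    rw [hq_def]
    exact (PySem.Int.le_floordiv_iff_mul_le hn).mpr (by rw [mul_comm]; linarith)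
  have hq2 : q < 2 ^ (K + 1) - 1 := by
    rw [hq_def]
    exact (PySem.Int.floordiv_lt_iff_lt_mul hn).mpr (by rw [mul_comm]; linarith)
  have hL : PySem.Int.bitLength (q + 1) = K + 1 :=
    bitLength_eq_of_bounds (q + 1) K (by linarith) (by linarith)
  rw [hL]
  have hKt : (((K + 1 : Nat) : Int) - 1).toNat = K := by omega
  rw [hKt]
  set d := PySem.Int.floordiv (r - 1 - n * (2 ^ K - 1)) (2 ^ K) with hd_def
  have hp2 : (0 : Int) < 2 ^ K := by positivity
  obtain ⟨hd1, hd2⟩ := (PySem.Int.floordiv_eq_iff_of_pos hp2).mp hd_def.symm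
  have hd0 : (0 : Int) ≤ d := by
    rw [hd_def]
    exact (PySem.Int.le_floordiv_iff_mul_le hp2).mpr (by linarith)
  have hd2' : r - 1 - n * (2 ^ K - 1) + 1 ≤ (d + 1) * 2 ^ K := Int.lt_iff_add_one_le.mp hd2
  have hloop2 : wisLoop2 r (n * (2 ^ K - 1)) (2 ^ K) 0 = d + 1 :=
    wisLoop2_spec r (n * (2 ^ K - 1)) (2 ^ K) 0 (d + 1) hp2 (by linarith) (by linarith)
      (by
        have e : d + 1 - 1 = d := by ring
        rw [e]
        linarith)
  rw [hloop2]
  have e : d + 1 - 1 = d := by ring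
  rw [e]
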